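-- pv_equiv track=rewrite | github.com/catalincodes/automate | ch4/commaCode.py | convertToPhrase
-- ===== SOURCE A (Python) =====
-- def convertToPhrase(listWords):
--     numWords = len(listWords)
--     if (numWords == 0): return 'You need to provide at least one word.'
--
--     phrase = ''
--     for (index, item) in enumerate(listWords):
--         if(index == 0): phrase += item
--         if(index != 0 and index < numWords - 1): phrase+= (', ' + item)
--         if(index == numWords - 1): phrase += (' and ' + item)
--
--     return phrase
-- ===== SOURCE B (Python) =====
-- def convertToPhrase(listWords):
--     if len(listWords) == 0:
--         return 'You need to provide at least one word.'
--     first = listWords[0]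
--     middle = ''.join(', ' + w for w in listWords[1:-1])
--     return first + middle + ' and ' + listWords[-1]
-- ===== Notes on version B (the rewrite author's own statement) =====
-- stated objective: simpler
-- what changed: Replaces the indexed enumerate loop with three per-index conditionals by a closed-form first/middle/last decomposition: join of the [1:-1] slice plus an unconditional ' and ' + last (which also reproduces the single-word 'w and w' output).
import Mathlib
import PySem

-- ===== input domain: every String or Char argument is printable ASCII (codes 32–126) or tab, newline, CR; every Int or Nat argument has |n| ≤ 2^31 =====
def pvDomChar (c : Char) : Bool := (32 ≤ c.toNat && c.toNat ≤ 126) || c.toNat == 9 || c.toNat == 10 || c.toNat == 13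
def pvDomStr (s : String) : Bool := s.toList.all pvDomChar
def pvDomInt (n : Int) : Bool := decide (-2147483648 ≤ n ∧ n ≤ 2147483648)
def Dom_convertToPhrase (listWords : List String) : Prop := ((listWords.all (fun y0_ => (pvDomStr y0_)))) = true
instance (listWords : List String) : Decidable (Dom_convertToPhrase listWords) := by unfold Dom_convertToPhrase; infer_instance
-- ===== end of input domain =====

-- B replaces A's indexed enumerate loop (three per-index conditionals) by a closed-form
-- first / join-of-middle-slice / last decomposition; objective: simpler.


-- ===== PORT A =====
-- loop body of A's 'for (index, item) in enumerate(listWords)'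
def convertToPhraseStep (numWords : Int) (phrase : String) (p : Int × String) : String :=
  let phrase := if p.1 = 0 then phrase ++ p.2 else phrase
  let phrase := if p.1 ≠ 0 ∧ p.1 < numWords - 1 then phrase ++ (", " ++ p.2) else phrase
  if p.1 = numWords - 1 then phrase ++ (" and " ++ p.2) else phrase

def convertToPhrase (listWords : List String) : String :=
  let numWords : Int := PySem.List.len listWords
  if numWords = 0 then "You need to provide at least one word."
  else (PySem.List.enumerate listWords).foldl (convertToPhraseStep numWords) ""

-- ===== PORT B =====
-- listWords[0] / listWords[-1] are guarded by the emptiness check, so the .getD ""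
-- defaults are never taken; the slice is exactly Python's listWords[1:-1].
def convertToPhrase_alt (listWords : List String) : String :=
  if listWords.length = 0 then "You need to provide at least one word."
  else
    let first := (PySem.List.pyGet? listWords 0).getD ""
    let middle := PySem.Str.join ""
      ((PySem.List.slice listWords (some 1) (some (-1))).map (fun w => ", " ++ w))
    first ++ middle ++ " and " ++ (PySem.List.pyGet? listWords (-1)).getD ""

-- ===== PRECONDITION & SPEC =====
def Spec_convertToPhrase (listWords : List String) (out : String) : Prop := out = convertToPhrase_alt listWords
instance (listWords : List String) (out : String) : Decidable (Spec_convertToPhrase listWords out) := by unfold Spec_convertToPhrase; infer_instance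

-- ===== CLAIM (what is proved, stated in full; the proofs are below) =====
def Claim_equal_convertToPhrase : Prop := ∀ (listWords : List String), Dom_convertToPhrase listWords → Spec_convertToPhrase listWords (convertToPhrase listWords)

-- ===== LEMMAS AND PROOFS =====

-- the string the middle words contribute, written recursively
def pvMids : List String → String
  | [] => ""
  | m :: rest => (", " ++ m) ++ pvMids rest

theorem pv_inter_nil {α : Type} (L : List (List α)) :
    (List.intersperse ([]:List α) L).flatten = L.flatten := by
  induction L with
  | nil => rfl
  | cons a t ih =>
    cases t with
    | nil => simp
    | cons b t' => simp [List.intersperse] at ih ⊢; simpa using ih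

theorem pvMids_eq_join (ms : List String) :
    PySem.Str.join "" (ms.map (fun w => ", " ++ w)) = pvMids ms := by
  apply String.toList_inj.mp
  simp only [PySem.Str.join, PySem.Chars.join, List.intercalate, String.toList_ofList]
  rw [show ("" : String).toList = ([] : List Char) from rfl, pv_inter_nil, List.map_map]
  induction ms with
  | nil => simp [pvMids]
  | cons m rest ih => simp [pvMids, Function.comp, ih]

-- A's loop over the middle words (indices 1 ≤ s, s + rest.length ≤ n - 1) only fires the ', ' branch
theorem pv_mid_loop (n : Int) (rest : List String) :
    ∀ (s : Int) (acc : String), 1 ≤ s → s + rest.length ≤ n - 1 →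
    (PySem.List.enumerate rest s).foldl (convertToPhraseStep n) acc = acc ++ pvMids rest := by
  induction rest with
  | nil => intro s acc _ _; simp [PySem.List.enumerate, pvMids]
  | cons m rest ih =>
    intro s acc hs hb
    rw [PySem.List.enumerate_cons]
    simp only [List.foldl_cons]
    have hstep : convertToPhraseStep n acc (s, m) = acc ++ (", " ++ m) := by
      unfold convertToPhraseStep
      simp only [List.length_cons] at hb
      push_cast at hb
      have h1 : s ≠ 0 := by omega
      have h2 : s < n - 1 := by omega
      have h3 : s ≠ n - 1 := by omega
      simp [h1, h2, h3]
    rw [hstep, ih (s+1) _ (by omega) (by simp only [List.length_cons] at hb; push_cast at hb ⊢; omega)]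
    simp [pvMids, String.append_assoc]

theorem pv_slice_mid (w z : String) (ms : List String) :
    PySem.List.slice (w :: ms ++ [z]) (some 1) (some (-1)) = ms := by
  simp [PySem.List.slice, PySem.List.clampIdx]
  rw [if_neg (by omega)]
  simp

-- ===== VERDICT (by name: the statement is the Claim_ definition above) =====
theorem convertToPhrase_spec : Claim_equal_convertToPhrase := by
  intro l _
  unfold Spec_convertToPhrase
  match l with
  | [] => rfl
  | [w] =>
    apply String.toList_inj.mp
    simp [convertToPhrase, convertToPhrase_alt, PySem.List.enumerate, convertToPhraseStep,
      PySem.List.len, PySem.Str.join, PySem.Chars.join, List.intercalate, PySem.List.slice,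
      PySem.List.pyGet?, PySem.List.pyIdx?, PySem.List.clampIdx]
  | w :: m :: t =>
    obtain ⟨ms, z, hmz⟩ : ∃ ms zz, m :: t = ms ++ [zz] :=
      ⟨(m :: t).dropLast, (m :: t).getLast (List.cons_ne_nil m t),
        (List.dropLast_append_getLast (List.cons_ne_nil m t)).symm⟩
    rw [hmz, show w :: (ms ++ [z]) = w :: ms ++ [z] from rfl]
    have hn : PySem.List.len (w :: ms ++ [z]) = (ms.length : Int) + 2 := by
      simp [PySem.List.len]; ring
    have hA : convertToPhrase (w :: ms ++ [z])
        = ((("" ++ w) ++ pvMids ms) ++ (" and " ++ z)) := by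
      unfold convertToPhrase
      rw [hn]
      have hne : ((ms.length : Int) + 2) ≠ 0 := by omega
      rw [if_neg hne]
      rw [show ((w : String) :: ms ++ [z]) = w :: (ms ++ [z]) from rfl, PySem.List.enumerate_cons]
      simp only [List.foldl_cons, zero_add]
      have h0 : convertToPhraseStep ((ms.length : Int) + 2) "" ((0:Int), w) = "" ++ w := by
        unfold convertToPhraseStep
        have hc : ((0:Int) = (ms.length : Int) + 2 - 1) = False := by
          simp; omega
        simp [hc]
      rw [h0, PySem.List.enumerate_append, List.foldl_append]
      rw [pv_mid_loop ((ms.length : Int) + 2) ms 1 ("" ++ w) le_rfl (by omega)]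
      rw [PySem.List.enumerate_cons]
      simp only [PySem.List.enumerate, List.foldl_cons, List.foldl_nil]
      unfold convertToPhraseStep
      have h1 : ((1:Int) + (ms.length : Int) = 0) = False := by simp; omega
      have h2 : (((1:Int) + (ms.length : Int)) < (ms.length : Int) + 2 - 1) = False := by
        simp; omega
      have h3 : ((1:Int) + (ms.length : Int) = (ms.length : Int) + 2 - 1) = True := by
        simp; omega
      simp only [h1, h2, h3, ne_eq, if_false, if_true, not_false_iff]
      simp
    have hB : convertToPhrase_alt (w :: ms ++ [z])
        = (((PySem.List.pyGet? (w :: ms ++ [z]) 0).getD "" ++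
            PySem.Str.join "" ((PySem.List.slice (w :: ms ++ [z]) (some 1) (some (-1))).map
              (fun w => ", " ++ w))) ++ " and ") ++
          (PySem.List.pyGet? (w :: ms ++ [z]) (-1)).getD "" := by
      unfold convertToPhrase_alt
      rw [if_neg (by simp)]
    have hfst : (PySem.List.pyGet? (w :: ms ++ [z]) 0).getD "" = w := by
      simp [PySem.List.pyGet?_zero]
    have hlst : (PySem.List.pyGet? (w :: ms ++ [z]) (-1)).getD "" = z := by
      rw [show ((w : String) :: ms ++ [z]) = (w :: ms) ++ [z] from rfl,
        PySem.List.pyGet?_neg_one_append_singleton]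
      rfl
    rw [hA, hB, hfst, hlst, pv_slice_mid, pvMids_eq_join]
    apply String.toList_inj.mp
    simp
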